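-- pv_equiv track=rewrite | github.com/alphaaa10/Paper_trail_backend | council_api/browse_router.py | _keyword_tokens
-- ===== SOURCE A (Python) =====
-- def _keyword_tokens(text: str) -> list[str]:
--     cleaned = "".join(char.lower() if char.isalnum() else " " for char in str(text))
--     parts = [part for part in cleaned.split() if len(part) > 2]
--     out: list[str] = []
--     for part in parts:
--         if part not in out:
--             out.append(part)
--     return out
-- ===== SOURCE B (Python) =====
-- def _keyword_tokens(text: str) -> list[str]:
--     out: list[str] = []
--     seen: set[str] = set()
--     buf: list[str] = []
--     for char in str(text):
--         if char.isalnum():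
--             buf.append(char.lower())
--         else:
--             word = "".join(buf)
--             if len(word) > 2 and word not in seen:
--                 seen.add(word)
--                 out.append(word)
--             buf = []
--     word = "".join(buf)
--     if len(word) > 2 and word not in seen:
--         seen.add(word)
--         out.append(word)
--     return out
-- ===== Notes on version B (the rewrite author's own statement) =====
-- stated objective: alternative
-- what changed: A builds a cleaned copy of the whole string, splits it, filters by length and deduplicates by scanning the output list; B is a single streaming pass over the characters that maintains a word buffer, a seen-set and the output list, flushing the buffer at each non-alphanumeric character and once at the end.
import Mathlib
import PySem

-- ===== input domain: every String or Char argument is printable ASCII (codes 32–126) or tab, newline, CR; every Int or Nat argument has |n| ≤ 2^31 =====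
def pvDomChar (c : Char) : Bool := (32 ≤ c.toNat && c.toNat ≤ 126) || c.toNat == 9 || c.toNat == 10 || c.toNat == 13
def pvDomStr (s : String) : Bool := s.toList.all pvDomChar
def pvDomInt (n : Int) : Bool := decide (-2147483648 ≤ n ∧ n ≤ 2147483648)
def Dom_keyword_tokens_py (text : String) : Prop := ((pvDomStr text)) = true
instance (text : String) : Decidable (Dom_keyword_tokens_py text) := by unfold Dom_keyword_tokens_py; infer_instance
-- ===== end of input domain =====

-- B replaces A's four-stage build-string/split/filter/dedup pipeline by one streaming pass
-- over the characters with a word buffer, a seen-set and the output list (objective: alternative).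

-- ===== PORT A =====
def keyword_tokens_py (text : String) : List String :=
  let cleaned : List Char :=
    text.toList.map (fun c => if PySem.Chars.isalnum c then PySem.Chars.lowerChar c else ' ')
  let parts : List (List Char) :=
    (PySem.Chars.split₀ cleaned).filter (fun p => decide (2 < p.length))
  (parts.foldl (fun out p => if p ∈ out then out else out ++ [p]) ([] : List (List Char))).map
    (fun p => String.mk p)

-- ===== PORT B =====
def ktGo : List Char → List (List Char) → PySem.Set (List Char) → List Char → List (List Char)
  | [], out, seen, buf =>
      if 2 < buf.length ∧ buf ∉ seen then out ++ [buf] else out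
  | c :: rest, out, seen, buf =>
      if PySem.Chars.isalnum c then
        ktGo rest out seen (buf ++ [PySem.Chars.lowerChar c])
      else if 2 < buf.length ∧ buf ∉ seen then
        ktGo rest (out ++ [buf]) (PySem.Set.add seen buf) []
      else
        ktGo rest out seen []

def keyword_tokens_py_alt (text : String) : List String :=
  (ktGo text.toList [] PySem.Set.empty []).map (fun p => String.mk p)

-- ===== PRECONDITION & SPEC =====
def Spec_keyword_tokens_py (text : String) (out : List String) : Prop := out = keyword_tokens_py_alt text
instance (text : String) (out : List String) : Decidable (Spec_keyword_tokens_py text out) := by unfold Spec_keyword_tokens_py; infer_instance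

-- ===== CLAIM (what is proved, stated in full; the proofs are below) =====
def Claim_equal_keyword_tokens_py : Prop := ∀ (text : String), Dom_keyword_tokens_py text → Spec_keyword_tokens_py text (keyword_tokens_py text)

-- ===== LEMMAS AND PROOFS =====

theorem kt_lower_not_space (c : Char) (h : PySem.Chars.isalnum c = true) :
    PySem.Chars.isspace (PySem.Chars.lowerChar c) = false := by
  simp [PySem.Chars.isalnum, PySem.Chars.isalpha, PySem.Chars.isupper, PySem.Chars.islower,
    PySem.Chars.isdigit, Char.le_def, UInt32.le_iff_toNat_le] at h
  have key : 48 ≤ (PySem.Chars.lowerChar c).toNat ∧ (PySem.Chars.lowerChar c).toNat ≤ 122 := by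
    unfold PySem.Chars.lowerChar
    by_cases hu : PySem.Chars.isupper c = true
    · rw [if_pos hu]
      simp [PySem.Chars.isupper, Char.le_def, UInt32.le_iff_toNat_le] at hu
      have hv : (Char.ofNat (c.toNat + 32)).toNat = c.toNat + 32 := by
        unfold Char.ofNat
        rw [dif_pos (Or.inl (by simp only [Char.toNat] at *; omega))]
        rfl
      rw [hv]
      simp only [Char.toNat] at *
      omega
    · rw [if_neg hu]
      simp only [Char.toNat] at *
      omega
  unfold PySem.Chars.isspace
  obtain ⟨k1, k2⟩ := key
  generalize hg : (PySem.Chars.lowerChar c).toNat = n at k1 k2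
  simp only [Bool.or_eq_false_iff, Bool.and_eq_false_iff, decide_eq_false_iff_not]
  omega

theorem kt_go_acc (cs : List Char) (cur : List Char) (acc : List (List Char)) :
    PySem.Chars.split₀.go cs cur acc = acc.reverse ++ PySem.Chars.split₀.go cs cur [] := by
  induction cs generalizing cur acc with
  | nil => simp [PySem.Chars.split₀.go]; split <;> simp
  | cons c rest ih =>
      simp only [PySem.Chars.split₀.go]
      split
      · split
        · exact ih _ _
        · rw [ih _ (cur.reverse :: acc), ih _ [cur.reverse]]; simp
      · exact ih _ _

theorem kt_main (cs : List Char) (out : List (List Char)) (seen : PySem.Set (List Char))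
    (buf : List Char) (hsync : ∀ w : List Char, w ∈ seen ↔ w ∈ out) :
    ktGo cs out seen buf =
      ((PySem.Chars.split₀.go
          (cs.map (fun c => if PySem.Chars.isalnum c then PySem.Chars.lowerChar c else ' '))
          buf.reverse []).filter (fun p => decide (2 < p.length))).foldl
        (fun out p => if p ∈ out then out else out ++ [p]) out := by
  induction cs generalizing out seen buf with
  | nil =>
      rcases Decidable.em (buf = []) with hb | hb
      · subst hb; simp [ktGo, PySem.Chars.split₀.go]
      · have hgo : PySem.Chars.split₀.go ([] : List Char) buf.reverse [] = [buf] := by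
          simp [PySem.Chars.split₀.go, hb]
        simp only [List.map_nil, hgo, ktGo]
        split_ifs with hc
        · have hno : buf ∉ out := fun h => hc.2 ((hsync buf).mpr h)
          simp [List.filter, hc.1, List.foldl, hno]
        · by_cases hl : 2 < buf.length
          · have hs : buf ∈ seen := by tauto
            simp [List.filter, hl, List.foldl, (hsync buf).mp hs]
          · simp [List.filter, hl]
  | cons c rest ih =>
      by_cases ha : PySem.Chars.isalnum c = true
      · simp only [ktGo, List.map_cons, ha, if_true]
        simp only [PySem.Chars.split₀.go, kt_lower_not_space c ha]
        rw [ih out seen (buf ++ [PySem.Chars.lowerChar c]) hsync]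
        simp
      · have ha' : PySem.Chars.isalnum c = false := by simpa using ha
        simp only [ktGo, List.map_cons, ha', if_false, Bool.false_eq_true]
        have hsp : PySem.Chars.isspace ' ' = true := by decide
        simp only [PySem.Chars.split₀.go, hsp, if_true]
        rcases Decidable.em (buf = []) with hb | hb
        · subst hb
          rw [if_neg (by simp)]
          simp only [List.reverse_nil, List.isEmpty_nil, if_true]
          exact ih out seen [] hsync
        · simp only [show buf.reverse.isEmpty = false by simp [hb], Bool.false_eq_true, if_false,
            List.reverse_reverse]
          rw [kt_go_acc _ [] [buf]]
          simp only [List.reverse_cons, List.reverse_nil, List.nil_append]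
          rw [List.filter_append, List.foldl_append]
          by_cases hl : 2 < buf.length
          · simp only [show List.filter (fun p => decide (2 < p.length)) [buf] = [buf] by simp [hl],
              List.foldl_cons, List.foldl_nil]
            by_cases hs : buf ∈ seen
            · rw [if_neg (by tauto)]
              rw [ih out seen [] hsync]
              simp [(hsync buf).mp hs]
            · rw [if_pos ⟨hl, hs⟩]
              have hno : buf ∉ out := fun h => hs ((hsync buf).mpr h)
              rw [ih (out ++ [buf]) (PySem.Set.add seen buf) [] (by
                intro w
                rw [PySem.Set.mem_add]
                simp [hsync w, or_comm])]
              simp [hno]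
          · rw [if_neg (by tauto)]
            simp only [show List.filter (fun p => decide (2 < p.length)) [buf] = [] by simp [hl],
              List.foldl_nil]
            exact ih out seen [] hsync

-- ===== VERDICT (by name: the statement is the Claim_ definition above) =====
theorem keyword_tokens_py_spec : Claim_equal_keyword_tokens_py := by
  intro text _
  unfold Spec_keyword_tokens_py keyword_tokens_py keyword_tokens_py_alt
  rw [kt_main text.toList [] PySem.Set.empty [] (by simp [PySem.Set.empty])]
  rfl
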